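-- pv_equiv track=rewrite | github.com/NicholasAllair/ITI1120 | Assignments/A5_8147249/a5_part1_8147249.py | sum_tri
-- ===== SOURCE A (Python) =====
-- def sum_tri(a,x):
--     '''
--     list and int -> bool
--     function takes in a list of ints and a int.  Returns true if any three numbers in a
--     have a sum which equals x.  Else returns Flase.
--     '''
--
--     for i in range(len(a)):
--         num1 = a[i]
--         for o in range(len(a)):
--             num2 = a[o]
--             for p in range(len(a)):
--                 num3 = a[p]
--                 if num1 + num2 + num3 == x:
--                     return True
--
--     return False
-- ===== SOURCE B (Python) =====
-- def sum_tri(a, x):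
--     '''
--     list and int -> bool
--     Same result as A, but O(n^2): precompute the set of all pairwise sums
--     (with repetition), then check whether x - w is a pairwise sum for some w in a.
--     '''
--     pair_sums = set()
--     for u in a:
--         for v in a:
--             pair_sums.add(u + v)
--     return any(x - w in pair_sums for w in a)
-- ===== Notes on version B (the rewrite author's own statement) =====
-- stated objective: faster
-- what changed: Replaced the triple nested scan with an O(n^2) precomputed set of pairwise sums followed by a single membership pass checking x - w.
import Mathlib
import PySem

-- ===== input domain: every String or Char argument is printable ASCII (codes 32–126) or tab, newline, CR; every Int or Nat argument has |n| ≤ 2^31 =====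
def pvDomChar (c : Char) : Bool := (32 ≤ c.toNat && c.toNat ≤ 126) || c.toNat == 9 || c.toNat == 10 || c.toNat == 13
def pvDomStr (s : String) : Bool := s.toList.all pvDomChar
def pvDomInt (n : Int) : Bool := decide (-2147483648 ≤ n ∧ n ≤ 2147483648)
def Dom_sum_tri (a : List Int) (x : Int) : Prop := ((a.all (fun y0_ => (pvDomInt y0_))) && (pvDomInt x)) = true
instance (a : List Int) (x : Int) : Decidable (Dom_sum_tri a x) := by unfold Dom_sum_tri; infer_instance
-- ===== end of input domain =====

-- B replaces A's O(n^3) triple scan by an O(n^2) set of pairwise sums plus one membership pass.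


-- ===== PORT A =====
-- for i in range(len(a)): num1 = a[i]; for o …: num2 = a[o]; for p …: num3 = a[p];
-- if num1+num2+num3 == x: return True; after the loops: return False.
-- Early 'return True' inside nested for-loops is List.any over the index ranges;
-- indices produced by range(len(a)) are always in range, so pyGetD's default is never used.
def sum_tri (a : List Int) (x : Int) : Bool :=
  (PySem.List.pyRange 0 (PySem.List.len a) 1).any (fun i =>
    let num1 := PySem.List.pyGetD a i 0
    (PySem.List.pyRange 0 (PySem.List.len a) 1).any (fun o =>
      let num2 := PySem.List.pyGetD a o 0
      (PySem.List.pyRange 0 (PySem.List.len a) 1).any (fun p =>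
        let num3 := PySem.List.pyGetD a p 0
        num1 + num2 + num3 == x)))

-- ===== PORT B =====
-- pair_sums = set(); for u in a: for v in a: pair_sums.add(u+v);
-- return any(x - w in pair_sums for w in a)
def sum_tri_alt (a : List Int) (x : Int) : Bool :=
  let pairSums : PySem.Set Int :=
    a.foldl (fun s u => a.foldl (fun s v => PySem.Set.add s (u + v)) s) PySem.Set.empty
  a.any (fun w => PySem.Set.contains pairSums (x - w))

-- ===== PRECONDITION & SPEC =====
def Spec_sum_tri (a : List Int) (x : Int) (out : Bool) : Prop := out = sum_tri_alt a x
instance (a : List Int) (x : Int) (out : Bool) : Decidable (Spec_sum_tri a x out) := by unfold Spec_sum_tri; infer_instance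

-- ===== CLAIM (what is proved, stated in full; the proofs are below) =====
def Claim_equal_sum_tri : Prop := ∀ (a : List Int) (x : Int), Dom_sum_tri a x → Spec_sum_tri a x (sum_tri a x)

-- ===== LEMMAS AND PROOFS =====

-- membership in B's nested pair-sum set (outer list generalized so induction goes through)
lemma mem_pairSums (l a : List Int) (s : PySem.Set Int) (y : Int) :
    y ∈ l.foldl (fun s u => a.foldl (fun s v => PySem.Set.add s (u + v)) s) s ↔
      y ∈ s ∨ ∃ u ∈ l, ∃ v ∈ a, y = u + v := by
  induction l generalizing s with
  | nil => simp
  | cons h t ih =>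
    rw [List.foldl_cons, ih, PySem.Set.mem_foldl_add (f := fun v => h + v)]
    constructor
    · rintro (⟨hs | ⟨v, hv, rfl⟩⟩ | ⟨u, hu, v, hv, rfl⟩)
      · exact Or.inl hs
      · exact Or.inr ⟨h, List.mem_cons_self, v, hv, rfl⟩
      · exact Or.inr ⟨u, List.mem_cons_of_mem _ hu, v, hv, rfl⟩
    · rintro (hs | ⟨u, hu, v, hv, rfl⟩)
      · exact Or.inl (Or.inl hs)
      · rcases List.mem_cons.1 hu with rfl | hu
        · exact Or.inl (Or.inr ⟨v, hv, rfl⟩)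
        · exact Or.inr ⟨u, hu, v, hv, rfl⟩

-- 'for i in range(len(xs)): … xs[i] …' with an early return scans exactly the elements of xs
lemma any_pyGetD (xs : List Int) (F : Int → Bool) :
    (PySem.List.pyRange 0 (PySem.List.len xs) 1).any (fun i => F (PySem.List.pyGetD xs i 0)) = xs.any F := by
  conv_rhs => rw [← PySem.List.map_pyGetD_pyRange_zero (xs := xs) (d := 0)]
  rw [List.any_map]
  rfl

-- A's nested index loops read exactly the elements of a
lemma sum_tri_eq_any (a : List Int) (x : Int) :
    sum_tri a x = a.any (fun u => a.any (fun v => a.any (fun w => u + v + w == x))) := by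
  unfold sum_tri
  dsimp only
  rw [any_pyGetD a (F := fun num1 =>
    (PySem.List.pyRange 0 (PySem.List.len a) 1).any (fun o =>
      (PySem.List.pyRange 0 (PySem.List.len a) 1).any (fun p =>
        num1 + PySem.List.pyGetD a o 0 + PySem.List.pyGetD a p 0 == x)))]
  refine PySem.List.any_congr_mem fun u _ => ?_
  rw [any_pyGetD a (F := fun num2 =>
    (PySem.List.pyRange 0 (PySem.List.len a) 1).any (fun p =>
      u + num2 + PySem.List.pyGetD a p 0 == x))]
  refine PySem.List.any_congr_mem fun v _ => ?_
  rw [any_pyGetD a (F := fun num3 => u + v + num3 == x)]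

-- ===== VERDICT (by name: the statement is the Claim_ definition above) =====
theorem sum_tri_spec : Claim_equal_sum_tri := by
  intro a x _
  unfold Spec_sum_tri sum_tri_alt
  rw [sum_tri_eq_any, Bool.eq_iff_iff]
  simp only [List.any_eq_true, PySem.Set.contains_iff, mem_pairSums a a, PySem.Set.empty,
    List.not_mem_nil, false_or, beq_iff_eq]
  constructor
  · rintro ⟨u, hu, v, hv, w, hw, h⟩
    exact ⟨w, hw, u, hu, v, hv, by omega⟩
  · rintro ⟨w, hw, u, hu, v, hv, h⟩
    exact ⟨u, hu, v, hv, w, hw, by omega⟩
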